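-- pv_equiv track=rewrite | github.com/pgrynfelder/algorithmics | logia/LOGIA 17 18 KURS/rosalind.py | rcompl
-- ===== SOURCE A (Python) =====
-- def rcompl(dna):
--     dna = dna.upper()
--     replacements = {'A': 't',
--                     'T': 'a',
--                     'G': 'c',
--                     'C': 'g'}
--     for key in replacements:
--         dna = dna.replace(key, replacements[key])
--     return dna.upper()[::-1]
-- ===== SOURCE B (Python) =====
-- def rcompl(dna):
--     table = {'A': 'T', 'T': 'A', 'G': 'C', 'C': 'G'}
--     return ''.join(table.get(c, c) for c in reversed(dna.upper()))
-- ===== Notes on version B (the rewrite author's own statement) =====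
-- stated objective: idiomatic
-- what changed: Replaces four sequential full-string replace passes (via a lowercase-trick dict) plus a second upper() with a single reversed character pass mapping each char through a direct uppercase complement table.
import Mathlib
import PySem

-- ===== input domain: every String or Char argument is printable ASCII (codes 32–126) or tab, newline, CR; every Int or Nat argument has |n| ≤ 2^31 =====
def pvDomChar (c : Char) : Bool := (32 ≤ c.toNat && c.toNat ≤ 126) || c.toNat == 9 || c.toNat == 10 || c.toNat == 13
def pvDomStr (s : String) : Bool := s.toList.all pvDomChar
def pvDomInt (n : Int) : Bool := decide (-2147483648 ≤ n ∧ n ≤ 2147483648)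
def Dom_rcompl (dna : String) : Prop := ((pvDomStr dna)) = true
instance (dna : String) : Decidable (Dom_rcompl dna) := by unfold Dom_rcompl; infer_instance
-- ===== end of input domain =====

-- B replaces A's four sequential full-string replace passes (lowercase-trick dict) and second
-- upper() by one reversed character pass through a direct uppercase complement table (idiomatic).

-- ===== PORT A =====
def rcompl (dna : String) : String :=
  -- dna = dna.upper()
  let dna0 := PySem.Str.upper dna
  -- replacements = {'A':'t','T':'a','G':'c','C':'g'}
  let replacements : PySem.Dict String String :=
    PySem.Dict.ofList [("A", "t"), ("T", "a"), ("G", "c"), ("C", "g")]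
  -- for key in replacements: dna = dna.replace(key, replacements[key])
  -- (iterating the dict's keys with their values, in insertion order)
  let dna1 := (PySem.Dict.items replacements).foldl
    (fun d kv => PySem.Str.replace d kv.1 kv.2) dna0
  -- return dna.upper()[::-1]   (s[::-1] never fails; slice? returns some here)
  ((PySem.Str.slice? (PySem.Str.upper dna1) none none (-1)).getD "")

-- ===== PORT B =====
def rcompl_alt (dna : String) : String :=
  let table : PySem.Dict Char Char :=
    PySem.Dict.ofList [('A', 'T'), ('T', 'A'), ('G', 'C'), ('C', 'G')]
  String.ofList (((PySem.Str.upper dna).toList.reverse).map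
    (fun c => PySem.Dict.getD table c c))

-- ===== PRECONDITION & SPEC =====
def Spec_rcompl (dna : String) (out : String) : Prop := out = rcompl_alt dna
instance (dna : String) (out : String) : Decidable (Spec_rcompl dna out) := by unfold Spec_rcompl; infer_instance

-- ===== CLAIM (what is proved, stated in full; the proofs are below) =====
def Claim_equal_rcompl : Prop := ∀ (dna : String), Dom_rcompl dna → Spec_rcompl dna (rcompl dna)

-- ===== LEMMAS AND PROOFS =====

-- A single-character replace is a pointwise map.
theorem replace_single_go (a b : Char) :
    ∀ (l : List Char) (fuel : Nat) (acc : List Char), l.length ≤ fuel →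
      PySem.Chars.replace.go [a] [b] fuel l acc =
        acc.reverse ++ l.map (fun c => if c = a then b else c) := by
  intro l
  induction l with
  | nil =>
      intro fuel acc _
      cases fuel <;> simp [PySem.Chars.replace.go]
  | cons c t ih =>
      intro fuel acc h
      cases fuel with
      | zero => simp at h
      | succ n =>
          simp only [List.length_cons] at h
          by_cases hc : c = a
          · subst hc
            have hp : [c].isPrefixOf (c :: t) = true := by simp [List.isPrefixOf]
            rw [PySem.Chars.replace.go, if_pos hp]
            show PySem.Chars.replace.go [c] [b] n t (b :: acc) = _
            rw [ih n _ (by omega)]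
            simp
          · have hp : [a].isPrefixOf (c :: t) = false := by
              simp [List.isPrefixOf]; exact fun h' => absurd h'.symm hc
            rw [PySem.Chars.replace.go, if_neg (by simp [hp])]
            rw [ih n _ (by omega)]
            simp [hc]

theorem replace_single (a b : Char) (l : List Char) :
    PySem.Chars.replace l [a] [b] = l.map (fun c => if c = a then b else c) := by
  rw [PySem.Chars.replace]
  simp only [List.isEmpty_cons]
  rw [if_neg (by simp)]
  rw [replace_single_go a b l l.length [] le_rfl]
  simp

theorem upperChar_not_lower (c : Char) :
    PySem.Chars.islower (PySem.Chars.upperChar c) = false := by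
  unfold PySem.Chars.upperChar
  by_cases h : PySem.Chars.islower c = true
  · rw [if_pos h]
    unfold PySem.Chars.islower at *
    simp only [Bool.and_eq_true, decide_eq_true_eq, Char.le_def, UInt32.le_iff_toNat_le] at h
    have h1 : 97 ≤ c.toNat := h.1
    have h2 : c.toNat ≤ 122 := h.2
    have hv : (c.toNat - 32).isValidChar := by left; omega
    have ht : (Char.ofNat (c.toNat - 32)).toNat = c.toNat - 32 := by
      rw [Char.toNat_ofNat, if_pos hv]
    simp only [Bool.and_eq_false_iff, decide_eq_false_iff_not, Char.le_def]
    left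
    rw [UInt32.le_iff_toNat_le]
    show ¬ (('a').toNat ≤ (Char.ofNat (c.toNat - 32)).toNat)
    rw [ht]
    have : ('a').toNat = 97 := rfl
    omega
  · rw [if_neg h]; exact Bool.eq_false_iff.mpr h

-- Pointwise: A's four single-char replaces followed by upper agree with B's table lookup
-- on every non-lowercase character (and every character A's pass sees is upperChar of something).
theorem pointwise (d : Char) (hd : PySem.Chars.islower d = false) :
    PySem.Chars.upperChar
      (if (if (if (if d = 'A' then 't' else d) = 'T' then 'a'
            else (if d = 'A' then 't' else d)) = 'G' then 'c'
          else (if (if d = 'A' then 't' else d) = 'T' then 'a'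
            else (if d = 'A' then 't' else d))) = 'C' then 'g'
        else (if (if (if d = 'A' then 't' else d) = 'T' then 'a'
            else (if d = 'A' then 't' else d)) = 'G' then 'c'
          else (if (if d = 'A' then 't' else d) = 'T' then 'a'
            else (if d = 'A' then 't' else d)))) =
    PySem.Dict.getD (PySem.Dict.ofList [('A','T'),('T','A'),('G','C'),('C','G')]) d d := by
  by_cases hA : d = 'A'
  · subst hA; decide
  by_cases hT : d = 'T'
  · subst hT; decide
  by_cases hG : d = 'G'
  · subst hG; decide
  by_cases hC : d = 'C'
  · subst hC; decide
  -- d is none of the four keys and not lowercase: everything is the identity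
  rw [if_neg hA, if_neg hT, if_neg hG, if_neg hC]
  have hupper : PySem.Chars.upperChar d = d := by
    unfold PySem.Chars.upperChar; rw [hd]; simp
  rw [hupper]
  have hit : (PySem.Dict.ofList [('A','T'),('T','A'),('G','C'),('C','G')] : PySem.Dict Char Char).items
      = [('A','T'),('T','A'),('G','C'),('C','G')] := by decide
  have e1 : ('A' == d) = false := by simp [Ne.symm hA]
  have e2 : ('T' == d) = false := by simp [Ne.symm hT]
  have e3 : ('G' == d) = false := by simp [Ne.symm hG]
  have e4 : ('C' == d) = false := by simp [Ne.symm hC]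
  simp [PySem.Dict.getD, PySem.Dict.get?, hit, List.find?, e1, e2, e3, e4]

-- ===== VERDICT (by name: the statement is the Claim_ definition above) =====
theorem rcompl_spec : Claim_equal_rcompl := by
  intro dna _
  unfold Spec_rcompl rcompl rcompl_alt
  have hit : (PySem.Dict.ofList [("A","t"),("T","a"),("G","c"),("C","g")] : PySem.Dict String String).items
      = [("A","t"),("T","a"),("G","c"),("C","g")] := by decide
  rw [← String.toList_inj]
  simp only [hit, List.foldl, PySem.Str.slice?_none_none_neg_one, Option.getD_some,
    String.toList_ofList]
  simp only [PySem.Str.toList_upper, PySem.Str.toList_replace, PySem.Chars.upper]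
  rw [show ("A" : String).toList = ['A'] from rfl, show ("t" : String).toList = ['t'] from rfl,
    show ("T" : String).toList = ['T'] from rfl, show ("a" : String).toList = ['a'] from rfl,
    show ("G" : String).toList = ['G'] from rfl, show ("c" : String).toList = ['c'] from rfl,
    show ("C" : String).toList = ['C'] from rfl, show ("g" : String).toList = ['g'] from rfl]
  rw [replace_single, replace_single, replace_single, replace_single]
  rw [List.map_reverse]
  congr 1
  simp only [List.map_map]
  apply List.map_congr_left
  intro c _
  simp only [Function.comp]
  exact pointwise (PySem.Chars.upperChar c) (upperChar_not_lower c)
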